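-- pv_equiv track=rewrite | github.com/avichalk/csc_120 | Long Projects/3/word_search.py | diag_str_lists
-- ===== SOURCE A (Python) =====
-- def diag_str_lists(grid_list):
--     '''
--     '''
--     a = 0
--     str_list_right_to_left = ['']*(len(grid_list)+len(grid_list[0])-1)
--     while a < len(grid_list):
--         b = 0
--         while b < len(grid_list[0]):
--             c = 0
--             while c < len(grid_list)+len(grid_list[0]):
--                 if a+b == c:
--                     str_list_right_to_left[c] += grid_list[a][b]
--                 c+=1
--             b+=1
--         a+=1
--     str_list_left_to_right = ['']*(len(grid_list)+len(grid_list[0])-1)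
--     rev_grid_list = [''] * len(grid_list)
--     i = 0
--     while i < len(grid_list):
--         j = len(grid_list[0])-1
--         while j >= 0:
--             rev_grid_list[i] += grid_list[i][j]
--             j-=1
--         i += 1
--     a = len(rev_grid_list)-1
--     while a >= 0:
--         b = 0
--         while b < len(rev_grid_list[0]):
--             c = len(rev_grid_list)+len(rev_grid_list[0])-2
--             while c >= 0:
--                 if a+b == c:
--                     str_list_left_to_right[c] += rev_grid_list[a][b]
--                 c-=1
--             b+=1
--         a-=1
--     return str_list_right_to_left, str_list_left_to_right
-- ===== SOURCE B (Python) =====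
-- def diag_str_lists(grid_list):
--     rows = len(grid_list)
--     width = len(grid_list[0])
--     n = rows + width - 1
--     right_to_left = [''] * n
--     left_to_right = [''] * n
--     for a in range(rows):
--         row = grid_list[a]
--         for b in range(width):
--             ch = row[b]
--             right_to_left[a + b] += ch
--             left_to_right[a + width - 1 - b] = ch + left_to_right[a + width - 1 - b]
--     return right_to_left, left_to_right
-- ===== Notes on version B (the rewrite author's own statement) =====
-- stated objective: faster
-- what changed: B makes one pass over the grid, indexing each diagonal bucket directly at a+b (appending) and each anti-diagonal bucket at a+width-1-b (prepending, which yields A's bottom-up order), instead of A's triple loop that scans all R+C diagonal indices for every cell plus an extra pass building a reversed grid.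
import Mathlib
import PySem

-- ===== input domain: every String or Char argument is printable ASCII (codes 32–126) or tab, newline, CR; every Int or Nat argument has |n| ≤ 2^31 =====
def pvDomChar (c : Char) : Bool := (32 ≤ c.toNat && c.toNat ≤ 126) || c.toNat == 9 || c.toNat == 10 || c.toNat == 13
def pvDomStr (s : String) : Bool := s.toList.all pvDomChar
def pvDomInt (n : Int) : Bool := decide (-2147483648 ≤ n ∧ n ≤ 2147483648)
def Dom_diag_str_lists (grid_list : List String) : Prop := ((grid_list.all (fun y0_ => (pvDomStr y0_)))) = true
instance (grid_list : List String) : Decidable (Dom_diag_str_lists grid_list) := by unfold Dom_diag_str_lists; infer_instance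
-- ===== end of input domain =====

-- B replaces A's O(R*C*(R+C)) triple scan (and the extra reversed-grid pass) by a single
-- O(R*C) pass that indexes each diagonal directly; objective: faster (asymptotic).

-- shared indexing/update primitives (Python list/str indexing and `lst[c] += ch` / prepend)
def pvRow (g : List String) (i : Int) : List Char := ((PySem.List.pyGet? g i).getD "").toList
def pvCh (r : List Char) (j : Int) : Char := (PySem.List.pyGet? r j).getD ' '
def pvApp (l : List (List Char)) (c : Int) (ch : Char) : List (List Char) :=
  l.set c.toNat (((PySem.List.pyGet? l c).getD []) ++ [ch])
def pvPre (l : List (List Char)) (c : Int) (ch : Char) : List (List Char) :=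
  l.set c.toNat (ch :: ((PySem.List.pyGet? l c).getD []))

-- ===== PORT A =====
def diag_str_lists (grid_list : List String) : List String × List String :=
  let R : Int := grid_list.length
  let W : Int := (pvRow grid_list 0).length
  let rtl :=
    (PySem.List.pyRange 0 R).foldl (fun l a =>
      (PySem.List.pyRange 0 W).foldl (fun l b =>
        (PySem.List.pyRange 0 (R + W)).foldl (fun l c =>
          if a + b == c then pvApp l c (pvCh (pvRow grid_list a) b) else l) l) l)
      (List.replicate (R + W - 1).toNat [])
  let rev_grid_list :=
    (PySem.List.pyRange 0 R).foldl (fun rg i =>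
      (PySem.List.pyRange (W - 1) (-1) (-1)).foldl (fun rg j =>
        rg.set i.toNat (((PySem.List.pyGet? rg i).getD []) ++ [pvCh (pvRow grid_list i) j])) rg)
      (List.replicate R.toNat [])
  let Rv : Int := rev_grid_list.length
  let Wv : Int := ((PySem.List.pyGet? rev_grid_list 0).getD []).length
  let ltr :=
    (PySem.List.pyRange (Rv - 1) (-1) (-1)).foldl (fun l a =>
      (PySem.List.pyRange 0 Wv).foldl (fun l b =>
        (PySem.List.pyRange (Rv + Wv - 2) (-1) (-1)).foldl (fun l c =>
          if a + b == c then pvApp l c (pvCh ((PySem.List.pyGet? rev_grid_list a).getD []) b) else l) l) l)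
      (List.replicate (R + W - 1).toNat [])
  (rtl.map String.mk, ltr.map String.mk)

-- ===== PORT B =====
def diag_str_lists_alt (grid_list : List String) : List String × List String :=
  let rows : Int := grid_list.length
  let width : Int := (pvRow grid_list 0).length
  let n : Nat := (rows + width - 1).toNat
  let p :=
    (PySem.List.pyRange 0 rows).foldl (fun p a =>
      (PySem.List.pyRange 0 width).foldl (fun p b =>
        (pvApp p.1 (a + b) (pvCh (pvRow grid_list a) b),
         pvPre p.2 (a + width - 1 - b) (pvCh (pvRow grid_list a) b))) p)
      (List.replicate n [], List.replicate n [])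
  (p.1.map String.mk, p.2.map String.mk)

-- ===== PRECONDITION & SPEC =====
-- Pre_ excludes exactly the inputs on which Python A raises an IndexError: the empty grid
-- (grid_list[0]) and grids having some row shorter than the first row (grid_list[a][b]).
def Pre_diag_str_lists (grid_list : List String) : Prop :=
  grid_list ≠ [] ∧ ∀ s ∈ grid_list, (grid_list.headI).toList.length ≤ s.toList.length
instance (grid_list : List String) : Decidable (Pre_diag_str_lists grid_list) := by
  unfold Pre_diag_str_lists; infer_instance
def pvWitness_diag_str_lists : List String := ["abc", "def"]

def Spec_diag_str_lists (grid_list : List String) (out : List String × List String) : Prop := out = diag_str_lists_alt grid_list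
instance (grid_list : List String) (out : List String × List String) : Decidable (Spec_diag_str_lists grid_list out) := by unfold Spec_diag_str_lists; infer_instance

-- ===== CLAIM (what is proved, stated in full; the proofs are below) =====
def Claim_equal_diag_str_lists : Prop := ∀ (grid_list : List String), Dom_diag_str_lists grid_list → Pre_diag_str_lists grid_list → Spec_diag_str_lists grid_list (diag_str_lists grid_list)

-- ===== LEMMAS AND PROOFS =====

def pvUp (m : Nat) : List Int := List.map (fun k : Nat => (k : Int)) (List.range m)
def pvDown (m : Nat) : List Int := List.map (fun k : Nat => (m : Int) - 1 - (k : Int)) (List.range m)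
def pvRunApp (E : List (List Char)) (evs : List (Int × Char)) : List (List Char) :=
  evs.foldl (fun l e => pvApp l e.1 e.2) E
def pvRunPre (E : List (List Char)) (evs : List (Int × Char)) : List (List Char) :=
  evs.foldl (fun l e => pvPre l e.1 e.2) E

lemma pv_pyRange_up (m : Nat) : PySem.List.pyRange 0 (m : Int) 1 = pvUp m := by
  unfold pvUp; exact PySem.List.pyRange_zero_natCast m

lemma pv_pyRange_down (m : Nat) :
    PySem.List.pyRange ((m : Int) - 1) (-1) (-1) = pvDown m := by
  unfold pvDown
  simp only [PySem.List.pyRange]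
  rw [if_neg (by norm_num)]
  rcases Nat.eq_zero_or_pos m with hm | hm
  · subst hm; norm_num
  · rw [if_neg (by norm_num), if_pos (by omega)]
    have h : ((((m : Int) - 1) - (-1) + -(-1) - 1) / -(-1)).toNat = m := by norm_num
    rw [h]
    exact List.map_congr_left (fun k hk => by ring)

lemma pv_mem_up {m : Nat} {x : Int} : x ∈ pvUp m ↔ 0 ≤ x ∧ x < m := by
  constructor
  · intro h
    simp only [pvUp, List.mem_map] at h
    obtain ⟨k, hk, rfl⟩ := h
    have := List.mem_range.mp hk; omega
  · intro ⟨h1, h2⟩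
    simp only [pvUp, List.mem_map]
    exact ⟨x.toNat, List.mem_range.mpr (by omega), by omega⟩

lemma pv_mem_down {m : Nat} {x : Int} : x ∈ pvDown m ↔ 0 ≤ x ∧ x < m := by
  constructor
  · intro h
    simp only [pvDown, List.mem_map] at h
    obtain ⟨k, hk, rfl⟩ := h
    have := List.mem_range.mp hk; omega
  · intro ⟨h1, h2⟩
    simp only [pvDown, List.mem_map]
    exact ⟨(↑m - 1 - x).toNat, List.mem_range.mpr (by omega), by omega⟩

lemma pv_nodup_up (m : Nat) : (pvUp m).Nodup :=
  (List.nodup_range).map (fun a b h => by exact_mod_cast h)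

lemma pv_nodup_down (m : Nat) : (pvDown m).Nodup :=
  (List.nodup_range).map (fun a b h => by omega)

lemma pv_foldl_if_not_mem {σ : Type} (gf : σ → Int → σ) (t : Int) :
    ∀ (l : List Int), t ∉ l → ∀ (init : σ),
      l.foldl (fun s x => if t == x then gf s x else s) init = init := by
  intro l
  induction l with
  | nil => intro _ init; rfl
  | cons x xs ih =>
    intro h init
    have hx : (t == x) = false := by
      simp only [beq_eq_false_iff_ne, ne_eq]
      exact fun he => h (he ▸ List.mem_cons_self)
    simp only [List.foldl_cons, hx, Bool.false_eq_true, if_false]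
    exact ih (fun hm => h (List.mem_cons_of_mem _ hm)) init

lemma pv_foldl_if_once {σ : Type} (gf : σ → Int → σ) (t : Int) :
    ∀ (l : List Int), l.Nodup → t ∈ l → ∀ (init : σ),
      l.foldl (fun s x => if t == x then gf s x else s) init = gf init t := by
  intro l
  induction l with
  | nil => intro _ h; exact absurd h (List.not_mem_nil)
  | cons x xs ih =>
    intro hnd hm init
    rcases List.mem_cons.mp hm with he | hm'
    · subst he
      simp only [List.foldl_cons, beq_self_eq_true, if_true]
      exact pv_foldl_if_not_mem gf t xs ((List.nodup_cons.mp hnd).1) _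
    · have hx : (t == x) = false := by
        simp only [beq_eq_false_iff_ne, ne_eq]
        exact fun he => ((List.nodup_cons.mp hnd).1) (he ▸ hm')
      simp only [List.foldl_cons, hx, Bool.false_eq_true, if_false]
      exact ih ((List.nodup_cons.mp hnd).2) hm' init

-- the inner c-scan of A: only c = t fires, so the whole scan is one direct update
lemma pv_cscan_up (l : List (List Char)) (t M : Int) (ch : Char)
    (h1 : 0 ≤ t) (h2 : t < M) :
    (PySem.List.pyRange 0 M).foldl
      (fun l c => if t == c then pvApp l c ch else l) l = pvApp l t ch := by
  have hM : M = ((M.toNat : Nat) : Int) := by omega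
  rw [hM, pv_pyRange_up]
  exact pv_foldl_if_once (fun s x => pvApp s x ch) t _ (pv_nodup_up _)
    (pv_mem_up.mpr ⟨h1, by omega⟩) l

lemma pv_cscan_down (l : List (List Char)) (t : Int) (m : Nat) (ch : Char)
    (h1 : 0 ≤ t) (h2 : t < m) :
    (PySem.List.pyRange ((m : Int) - 1) (-1) (-1)).foldl
      (fun l c => if t == c then pvApp l c ch else l) l = pvApp l t ch := by
  rw [pv_pyRange_down]
  exact pv_foldl_if_once (fun s x => pvApp s x ch) t _ (pv_nodup_down _)
    (pv_mem_down.mpr ⟨h1, h2⟩) l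

lemma pv_runApp_getElem? (k : Nat) (evs : List (Int × Char)) :
    ∀ E, (∀ e ∈ evs, 0 ≤ e.1 ∧ e.1 < (E.length : Int)) →
      (pvRunApp E evs)[k]? =
        E[k]?.map (fun s => s ++ (evs.filter (fun e => e.1 == (k : Int))).map (·.2)) := by
  induction evs with
  | nil => intro E _; simp [pvRunApp]
  | cons e evs ih =>
    intro E hb
    obtain ⟨c, ch⟩ := e
    obtain ⟨hc0, hcl⟩ := hb _ List.mem_cons_self
    obtain ⟨cn, rfl⟩ : ∃ cn : Nat, c = (cn : Int) := ⟨c.toNat, by omega⟩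
    have hcl' : (cn : Int) < (E.length : Int) := hcl
    have hlt : cn < E.length := by exact_mod_cast hcl'
    have hA : pvApp E (cn : Int) ch = E.set cn (E[cn] ++ [ch]) := by
      simp [pvApp, PySem.List.pyGet?_natCast, List.getElem?_eq_getElem hlt]
    have hb' : ∀ e ∈ evs, 0 ≤ e.1 ∧ e.1 < ((pvApp E (cn : Int) ch).length : Int) := by
      intro e he
      have hl : (pvApp E (cn : Int) ch).length = E.length := by simp [pvApp]
      rw [hl]
      exact hb e (List.mem_cons_of_mem _ he)
    simp only [pvRunApp, List.foldl_cons] at *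
    rw [ih _ hb', hA]
    by_cases hk : cn = k
    · subst hk
      have hfe : (((cn : Nat) : Int) == ((cn : Nat) : Int)) = true := by simp
      rw [List.getElem?_set_self hlt, List.getElem?_eq_getElem hlt]
      simp only [List.filter_cons, hfe, if_true, Option.map_some, List.map_cons]
      simp
    · have hne : (((cn : Nat) : Int) == ((k : Nat) : Int)) = false := by
        simp only [beq_eq_false_iff_ne, ne_eq]
        exact_mod_cast hk
      rw [List.getElem?_set_ne hk]
      simp only [List.filter_cons, hne, Bool.false_eq_true, if_false]

lemma pv_runPre_getElem? (k : Nat) (evs : List (Int × Char)) :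
    ∀ E, (∀ e ∈ evs, 0 ≤ e.1 ∧ e.1 < (E.length : Int)) →
      (pvRunPre E evs)[k]? =
        E[k]?.map (fun s => ((evs.filter (fun e => e.1 == (k : Int))).map (·.2)).reverse ++ s) := by
  induction evs with
  | nil => intro E _; simp [pvRunPre]
  | cons e evs ih =>
    intro E hb
    obtain ⟨c, ch⟩ := e
    obtain ⟨hc0, hcl⟩ := hb _ List.mem_cons_self
    obtain ⟨cn, rfl⟩ : ∃ cn : Nat, c = (cn : Int) := ⟨c.toNat, by omega⟩
    have hcl' : (cn : Int) < (E.length : Int) := hcl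
    have hlt : cn < E.length := by exact_mod_cast hcl'
    have hA : pvPre E (cn : Int) ch = E.set cn (ch :: E[cn]) := by
      simp [pvPre, PySem.List.pyGet?_natCast, List.getElem?_eq_getElem hlt]
    have hb' : ∀ e ∈ evs, 0 ≤ e.1 ∧ e.1 < ((pvPre E (cn : Int) ch).length : Int) := by
      intro e he
      have hl : (pvPre E (cn : Int) ch).length = E.length := by simp [pvPre]
      rw [hl]
      exact hb e (List.mem_cons_of_mem _ he)
    simp only [pvRunPre, List.foldl_cons] at *
    rw [ih _ hb', hA]
    by_cases hk : cn = k
    · subst hk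
      have hfe : (((cn : Nat) : Int) == ((cn : Nat) : Int)) = true := by simp
      rw [List.getElem?_set_self hlt, List.getElem?_eq_getElem hlt]
      simp only [List.filter_cons, hfe, if_true, Option.map_some, List.map_cons]
      simp
    · have hne : (((cn : Nat) : Int) == ((k : Nat) : Int)) = false := by
        simp only [beq_eq_false_iff_ne, ne_eq]
        exact_mod_cast hk
      rw [List.getElem?_set_ne hk]
      simp only [List.filter_cons, hne, Bool.false_eq_true, if_false]

lemma pv_filter_linear (m : Nat) (t : Int) :
    (pvUp m).filter (fun b => t == b) = if 0 ≤ t ∧ t < m then [t] else [] := by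
  induction m with
  | zero => simp [pvUp]
  | succ m ih =>
    have : pvUp (m + 1) = pvUp m ++ [(m : Int)] := by
      simp [pvUp, List.range_succ]
    rw [this, List.filter_append, ih]
    simp only [List.filter_cons, List.filter_nil]
    by_cases he : t = (m : Int)
    · subst he
      simp only [beq_self_eq_true, if_true]
      rw [if_neg (by omega), if_pos ⟨by omega, by push_cast; omega⟩]
      simp
    · have hne : (t == (m : Int)) = false := by simpa using he
      simp only [hne, Bool.false_eq_true, if_false, List.append_nil]
      by_cases h1 : 0 ≤ t ∧ t < (m : Int)
      · rw [if_pos h1, if_pos (by push_cast; omega)]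
      · rw [if_neg h1, if_neg (by push_cast; omega)]

-- ===== assembling the two sides =====

lemma pv_down_eq_rev (m : Nat) : pvDown m = (pvUp m).reverse := by
  induction m with
  | zero => rfl
  | succ m ih =>
    have h1 : pvDown (m + 1) = (m : Int) :: pvDown m := by
      simp only [pvDown, List.range_succ_eq_map, List.map_cons, List.map_map]
      refine congrArg₂ _ (by push_cast; ring) (List.map_congr_left fun k _ => ?_)
      simp only [Function.comp_apply]
      push_cast; ring
    have h2 : pvUp (m + 1) = pvUp m ++ [(m : Int)] := by
      simp [pvUp, List.range_succ]
    rw [h1, h2, List.reverse_append, ih]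
    simp
  
lemma pv_row_fold (f : Int → Char) (i : Nat) :
    ∀ (js : List Int) (rg : List (List Char)),
      js.foldl (fun rg j => rg.set i (((PySem.List.pyGet? rg (i : Int)).getD []) ++ [f j])) rg
        = rg.set i (((PySem.List.pyGet? rg (i : Int)).getD []) ++ js.map f) := by
  intro js
  induction js with
  | nil =>
    intro rg
    simp only [List.foldl_nil, List.map_nil, List.append_nil]
    by_cases hi : i < rg.length
    · rw [PySem.List.pyGet?_natCast, List.getElem?_eq_getElem hi]
      simpa using (List.set_getElem_self hi).symm
    · rw [List.set_eq_of_length_le (by omega)]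
  | cons j js ih =>
    intro rg
    simp only [List.foldl_cons]
    rw [ih]
    by_cases hi : i < rg.length
    · have hg1 : PySem.List.pyGet? rg (i : Int) = some rg[i] := by
        rw [PySem.List.pyGet?_natCast]; exact List.getElem?_eq_getElem hi
      have hset : PySem.List.pyGet?
          (rg.set i (((PySem.List.pyGet? rg (i : Int)).getD []) ++ [f j])) (i : Int)
          = some (((PySem.List.pyGet? rg (i : Int)).getD []) ++ [f j]) := by
        rw [PySem.List.pyGet?_natCast]
        exact List.getElem?_set_self hi
      rw [hset, List.set_set]
      simp [hg1]
    · have hlen : rg.length ≤ i := by omega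
      simp [List.set_eq_of_length_le hlen]

lemma pv_fold_set_rows (rowvals : Nat → List Char) :
    ∀ (m : Nat) (init : List (List Char)),
      (((List.range m).foldl
          (fun rg i => rg.set i (((PySem.List.pyGet? rg (i : Int)).getD []) ++ rowvals i)) init).length
        = init.length)
      ∧ ∀ q : Nat,
        ((List.range m).foldl
            (fun rg i => rg.set i (((PySem.List.pyGet? rg (i : Int)).getD []) ++ rowvals i)) init)[q]?
          = if q < m then init[q]?.map (· ++ rowvals q) else init[q]? := by
  intro m
  induction m with
  | zero => intro init; exact ⟨rfl, fun q => by simp⟩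
  | succ m ih =>
    intro init
    obtain ⟨ihl, ihg⟩ := ih init
    rw [List.range_succ]
    simp only [List.foldl_append, List.foldl_cons, List.foldl_nil]
    have hm : PySem.List.pyGet?
        ((List.range m).foldl
          (fun rg i => rg.set i (((PySem.List.pyGet? rg (i : Int)).getD []) ++ rowvals i)) init)
        ((m : Nat) : Int) = init[m]? := by
      rw [PySem.List.pyGet?_natCast, ihg m, if_neg (by omega)]
    constructor
    · rw [List.length_set]
      exact ihl
    · intro q
      by_cases him : m < init.length
      · have hq : init[m]? = some init[m] := List.getElem?_eq_getElem him
        rw [hm, hq]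
        by_cases hqm : q = m
        · subst hqm
          rw [List.getElem?_set_self (by omega), if_pos (by omega), hq]
          rfl
        · rw [List.getElem?_set_ne (fun h => hqm h.symm), ihg q]
          by_cases hql : q < m
          · rw [if_pos hql, if_pos (by omega)]
          · rw [if_neg hql, if_neg (by omega)]
      · rw [hm, List.set_eq_of_length_le (by omega), ihg q]
        have hnone : init[m]? = none := List.getElem?_eq_none (by omega)
        by_cases hql : q < m
        · rw [if_pos hql, if_pos (by omega)]
        · rw [if_neg hql]
          by_cases hqm : q = m
          · subst hqm
            rw [if_pos (by omega), hnone]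
            rfl
          · rw [if_neg (by omega)]

lemma pv_rowvals_ch (g : List String) (Wn : Nat) (a t : Int)
    (h0 : 0 ≤ t) (h1 : t < (Wn : Int)) :
    pvCh ((pvDown Wn).map (fun j => pvCh (pvRow g a) j)) t
      = pvCh (pvRow g a) ((Wn : Int) - 1 - t) := by
  obtain ⟨tn, rfl⟩ : ∃ tn : Nat, t = (tn : Int) := ⟨t.toNat, by omega⟩
  have htn : tn < Wn := by exact_mod_cast h1
  conv_lhs => rw [pvCh, PySem.List.pyGet?_natCast]
  rw [List.getElem?_map]
  rw [pvDown, List.getElem?_map, List.getElem?_range htn]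
  rfl

-- A's first phase with the c-scan collapsed to a direct indexed update
lemma pv_rtlA_eq (g : List String) (Rn Wn : Nat) (E : List (List Char)) :
    (PySem.List.pyRange 0 (Rn : Int)).foldl (fun l a =>
      (PySem.List.pyRange 0 (Wn : Int)).foldl (fun l b =>
        (PySem.List.pyRange 0 ((Rn : Int) + (Wn : Int))).foldl (fun l c =>
          if a + b == c then pvApp l c (pvCh (pvRow g a) b) else l) l) l) E
    = (PySem.List.pyRange 0 (Rn : Int)).foldl (fun l a =>
        (PySem.List.pyRange 0 (Wn : Int)).foldl (fun l b =>
          pvApp l (a + b) (pvCh (pvRow g a) b)) l) E := by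
  apply PySem.List.foldl_congr_mem
  intro acc a ha
  apply PySem.List.foldl_congr_mem
  intro acc2 b hb
  have ha' := PySem.List.mem_pyRange_one.mp ha
  have hb' := PySem.List.mem_pyRange_one.mp hb
  exact pv_cscan_up _ _ _ _ (by omega) (by omega)

-- B's single pass splits into its two independent components
lemma pv_B_eq (g : List String) (Rn Wn : Nat) (E : List (List Char)) :
    (PySem.List.pyRange 0 (Rn : Int)).foldl (fun p a =>
      (PySem.List.pyRange 0 (Wn : Int)).foldl (fun p b =>
        (pvApp p.1 (a + b) (pvCh (pvRow g a) b),
         pvPre p.2 (a + (Wn : Int) - 1 - b) (pvCh (pvRow g a) b))) p) (E, E)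
    = ((PySem.List.pyRange 0 (Rn : Int)).foldl (fun l a =>
         (PySem.List.pyRange 0 (Wn : Int)).foldl (fun l b =>
           pvApp l (a + b) (pvCh (pvRow g a) b)) l) E,
       (PySem.List.pyRange 0 (Rn : Int)).foldl (fun l a =>
         (PySem.List.pyRange 0 (Wn : Int)).foldl (fun l b =>
           pvPre l (a + (Wn : Int) - 1 - b) (pvCh (pvRow g a) b)) l) E) := by
  have h1 : ∀ (p : List (List Char) × List (List Char)) (a : Int),
      (PySem.List.pyRange 0 (Wn : Int)).foldl (fun p b =>
        (pvApp p.1 (a + b) (pvCh (pvRow g a) b),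
         pvPre p.2 (a + (Wn : Int) - 1 - b) (pvCh (pvRow g a) b))) p
      = ((PySem.List.pyRange 0 (Wn : Int)).foldl (fun s b =>
           pvApp s (a + b) (pvCh (pvRow g a) b)) p.1,
         (PySem.List.pyRange 0 (Wn : Int)).foldl (fun s b =>
           pvPre s (a + (Wn : Int) - 1 - b) (pvCh (pvRow g a) b)) p.2) :=
    fun p a => by
      obtain ⟨p1, p2⟩ := p
      exact PySem.List.foldl_prod_mk
        (fun s b => pvApp s (a + b) (pvCh (pvRow g a) b))
        (fun s b => pvPre s (a + (Wn : Int) - 1 - b) (pvCh (pvRow g a) b))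
        (PySem.List.pyRange 0 (Wn : Int)) p1 p2
  rw [PySem.List.foldl_congr_mem _ _
        (fun p a =>
          ((PySem.List.pyRange 0 (Wn : Int)).foldl (fun s b =>
             pvApp s (a + b) (pvCh (pvRow g a) b)) p.1,
           (PySem.List.pyRange 0 (Wn : Int)).foldl (fun s b =>
             pvPre s (a + (Wn : Int) - 1 - b) (pvCh (pvRow g a) b)) p.2))
        (E, E) (fun acc x _ => h1 acc x)]
  exact PySem.List.foldl_prod_mk
    (fun l a => (PySem.List.pyRange 0 (Wn : Int)).foldl (fun l b =>
      pvApp l (a + b) (pvCh (pvRow g a) b)) l)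
    (fun l a => (PySem.List.pyRange 0 (Wn : Int)).foldl (fun l b =>
      pvPre l (a + (Wn : Int) - 1 - b) (pvCh (pvRow g a) b)) l)
    (PySem.List.pyRange 0 (Rn : Int)) E E

-- the reversed-grid pass of A: its rows are the reversed rows of the grid
lemma pv_rev_spec (g : List String) (Rn Wn : Nat) :
    (((PySem.List.pyRange 0 (Rn : Int)).foldl (fun rg i =>
        (PySem.List.pyRange ((Wn : Int) - 1) (-1) (-1)).foldl (fun rg j =>
          rg.set i.toNat (((PySem.List.pyGet? rg i).getD []) ++ [pvCh (pvRow g i) j])) rg)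
        (List.replicate Rn [])).length = Rn)
    ∧ ∀ a : Int, 0 ≤ a → a < (Rn : Int) →
      ((PySem.List.pyGet?
          ((PySem.List.pyRange 0 (Rn : Int)).foldl (fun rg i =>
            (PySem.List.pyRange ((Wn : Int) - 1) (-1) (-1)).foldl (fun rg j =>
              rg.set i.toNat (((PySem.List.pyGet? rg i).getD []) ++ [pvCh (pvRow g i) j])) rg)
            (List.replicate Rn [])) a).getD [])
        = (pvDown Wn).map (fun j => pvCh (pvRow g a) j) := by
  have hbody : (PySem.List.pyRange 0 (Rn : Int)).foldl (fun rg i =>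
        (PySem.List.pyRange ((Wn : Int) - 1) (-1) (-1)).foldl (fun rg j =>
          rg.set i.toNat (((PySem.List.pyGet? rg i).getD []) ++ [pvCh (pvRow g i) j])) rg)
        (List.replicate Rn [])
      = (List.range Rn).foldl (fun rg i =>
          rg.set i (((PySem.List.pyGet? rg (i : Int)).getD [])
            ++ (pvDown Wn).map (fun j => pvCh (pvRow g (i : Int)) j))) (List.replicate Rn []) := by
    rw [pv_pyRange_up]
    unfold pvUp
    rw [List.foldl_map]
    apply PySem.List.foldl_congr_mem
    intro acc i _
    rw [pv_pyRange_down]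
    have := pv_row_fold (fun j => pvCh (pvRow g (i : Int)) j) i (pvDown Wn) acc
    simpa using this
  constructor
  · rw [hbody]
    rw [(pv_fold_set_rows _ Rn (List.replicate Rn [])).1]
    simp
  · intro a h0 hR
    obtain ⟨an, rfl⟩ : ∃ an : Nat, a = (an : Int) := ⟨a.toNat, by omega⟩
    have han : an < Rn := by exact_mod_cast hR
    rw [hbody, PySem.List.pyGet?_natCast,
      (pv_fold_set_rows _ Rn (List.replicate Rn [])).2 an, if_pos han,
      List.getElem?_replicate, if_pos han]
    rfl

-- A's second phase with rev rows substituted and the c-scan collapsed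
lemma pv_ltrA_eq (g : List String) (rev : List (List Char)) (Rn Wn N : Nat)
    (E : List (List Char))
    (hrow : ∀ a : Int, 0 ≤ a → a < (Rn : Int) →
      (PySem.List.pyGet? rev a).getD [] = (pvDown Wn).map (fun j => pvCh (pvRow g a) j))
    (hN : (N : Int) = (Rn : Int) + (Wn : Int) - 1) :
    (PySem.List.pyRange ((Rn : Int) - 1) (-1) (-1)).foldl (fun l a =>
      (PySem.List.pyRange 0 (Wn : Int)).foldl (fun l b =>
        (PySem.List.pyRange ((Rn : Int) + (Wn : Int) - 2) (-1) (-1)).foldl (fun l c =>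
          if a + b == c then pvApp l c (pvCh ((PySem.List.pyGet? rev a).getD []) b) else l) l) l) E
    = (pvDown Rn).foldl (fun l a =>
        (pvUp Wn).foldl (fun l b =>
          pvApp l (a + b) (pvCh ((pvDown Wn).map (fun j => pvCh (pvRow g a) j)) b)) l) E := by
  rw [pv_pyRange_down Rn, pv_pyRange_up Wn]
  apply PySem.List.foldl_congr_mem
  intro acc a ha
  obtain ⟨ha0, haR⟩ := pv_mem_down.mp ha
  apply PySem.List.foldl_congr_mem
  intro acc2 b hb
  obtain ⟨hb0, hbW⟩ := pv_mem_up.mp hb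
  rw [hrow a ha0 haR]
  have hcr : ((Rn : Int) + (Wn : Int) - 2) = (N : Int) - 1 := by omega
  rw [hcr]
  exact pv_cscan_down _ _ _ _ (by omega) (by omega)

-- the heart: appending along descending rows = prepending along ascending rows
lemma pv_ltr_core (g : List String) (Rn Wn N : Nat)
    (hN : (N : Int) = (Rn : Int) + (Wn : Int) - 1) :
    (pvDown Rn).foldl (fun l a =>
      (pvUp Wn).foldl (fun l b =>
        pvApp l (a + b) (pvCh ((pvDown Wn).map (fun j => pvCh (pvRow g a) j)) b)) l)
      (List.replicate N ([] : List Char))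
    = (pvUp Rn).foldl (fun l a =>
        (pvUp Wn).foldl (fun l b =>
          pvPre l (a + (Wn : Int) - 1 - b) (pvCh (pvRow g a) b)) l)
        (List.replicate N ([] : List Char)) := by
  have hA : (pvDown Rn).foldl (fun l a =>
      (pvUp Wn).foldl (fun l b =>
        pvApp l (a + b) (pvCh ((pvDown Wn).map (fun j => pvCh (pvRow g a) j)) b)) l)
      (List.replicate N ([] : List Char))
      = pvRunApp (List.replicate N ([] : List Char))
          ((pvDown Rn).flatMap (fun a => (pvUp Wn).map (fun b =>
            (a + b, pvCh ((pvDown Wn).map (fun j => pvCh (pvRow g a) j)) b)))) := by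
    rw [pvRunApp, List.foldl_flatMap]
    simp only [List.foldl_map]
  have hB : (pvUp Rn).foldl (fun l a =>
      (pvUp Wn).foldl (fun l b =>
        pvPre l (a + (Wn : Int) - 1 - b) (pvCh (pvRow g a) b)) l)
      (List.replicate N ([] : List Char))
      = pvRunPre (List.replicate N ([] : List Char))
          ((pvUp Rn).flatMap (fun a => (pvUp Wn).map (fun b =>
            (a + (Wn : Int) - 1 - b, pvCh (pvRow g a) b)))) := by
    rw [pvRunPre, List.foldl_flatMap]
    simp only [List.foldl_map]
  rw [hA, hB]
  have hbA : ∀ e ∈ (pvDown Rn).flatMap (fun a => (pvUp Wn).map (fun b =>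
      (a + b, pvCh ((pvDown Wn).map (fun j => pvCh (pvRow g a) j)) b))),
      0 ≤ e.1 ∧ e.1 < ((List.replicate N ([] : List Char)).length : Int) := by
    intro e he
    simp only [List.mem_flatMap, List.mem_map] at he
    obtain ⟨a, ha, b, hb, rfl⟩ := he
    obtain ⟨ha0, haR⟩ := pv_mem_down.mp ha
    obtain ⟨hb0, hbW⟩ := pv_mem_up.mp hb
    simp only [List.length_replicate]
    constructor <;> [omega; omega]
  have hbB : ∀ e ∈ (pvUp Rn).flatMap (fun a => (pvUp Wn).map (fun b =>
      (a + (Wn : Int) - 1 - b, pvCh (pvRow g a) b))),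
      0 ≤ e.1 ∧ e.1 < ((List.replicate N ([] : List Char)).length : Int) := by
    intro e he
    simp only [List.mem_flatMap, List.mem_map] at he
    obtain ⟨a, ha, b, hb, rfl⟩ := he
    obtain ⟨ha0, haR⟩ := pv_mem_up.mp ha
    obtain ⟨hb0, hbW⟩ := pv_mem_up.mp hb
    simp only [List.length_replicate]
    constructor <;> [omega; omega]
  apply List.ext_getElem?
  intro k
  rw [pv_runApp_getElem? k _ _ hbA, pv_runPre_getElem? k _ _ hbB,
    List.getElem?_replicate]
  by_cases hk : k < N
  · rw [if_pos hk]
    simp only [Option.map_some, Option.some.injEq, List.nil_append, List.append_nil]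
    rw [List.filter_flatMap, List.filter_flatMap, List.map_flatMap, List.map_flatMap]
    have hsideA : ∀ a : Int, List.map (fun x => x.2)
        (List.filter (fun e => e.1 == (k : Int))
          ((pvUp Wn).map (fun b =>
            (a + b, pvCh ((pvDown Wn).map (fun j => pvCh (pvRow g a) j)) b))))
        = if 0 ≤ (k : Int) - a ∧ (k : Int) - a < (Wn : Int)
          then [pvCh ((pvDown Wn).map (fun j => pvCh (pvRow g a) j)) ((k : Int) - a)]
          else [] := by
      intro a
      rw [List.filter_map, List.map_map]
      rw [List.filter_congr (l := pvUp Wn)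
        (q := fun b => ((k : Int) - a) == b) (fun b _ => by
          simp only [Function.comp_apply]
          rw [Bool.eq_iff_iff]
          simp only [beq_iff_eq]
          omega)]
      rw [pv_filter_linear Wn ((k : Int) - a)]
      split_ifs with h
      · simp only [List.map_cons, List.map_nil, Function.comp_apply]
      · simp
    have hsideB : ∀ a : Int, List.map (fun x => x.2)
        (List.filter (fun e => e.1 == (k : Int))
          ((pvUp Wn).map (fun b => (a + (Wn : Int) - 1 - b, pvCh (pvRow g a) b))))
        = if 0 ≤ (k : Int) - a ∧ (k : Int) - a < (Wn : Int)
          then [pvCh (pvRow g a) (a + (Wn : Int) - 1 - (k : Int))]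
          else [] := by
      intro a
      rw [List.filter_map, List.map_map]
      rw [List.filter_congr (l := pvUp Wn)
        (q := fun b => (a + (Wn : Int) - 1 - (k : Int)) == b) (fun b _ => by
          simp only [Function.comp_apply]
          rw [Bool.eq_iff_iff]
          simp only [beq_iff_eq]
          omega)]
      rw [pv_filter_linear Wn (a + (Wn : Int) - 1 - (k : Int))]
      split_ifs with h1 h2 h2
      · simp only [List.map_cons, List.map_nil, Function.comp_apply]
      · exact absurd ⟨by omega, by omega⟩ h2
      · exact absurd ⟨by omega, by omega⟩ h1
      · simp
    rw [List.flatMap_congr (fun a _ => hsideA a), List.flatMap_congr (fun a _ => hsideB a)]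
    rw [List.reverse_flatMap, ← pv_down_eq_rev]
    apply List.flatMap_congr
    intro a _
    simp only [Function.comp_apply]
    split_ifs with h
    · rw [List.reverse_singleton, pv_rowvals_ch g Wn a ((k : Int) - a) h.1 h.2]
      have harg : ((Wn : Int) - 1 - ((k : Int) - a)) = a + (Wn : Int) - 1 - (k : Int) := by
        ring
      rw [harg]
    · rfl
  · rw [if_neg hk]
    rfl
  
theorem pv_main (g : List String) (hg : g ≠ []) :
    diag_str_lists g = diag_str_lists_alt g := by
  have hR1 : 0 < g.length := List.length_pos_of_ne_nil hg
  have hNc : (((g.length : Nat) : Int) + (((pvRow g 0).length : Nat) : Int) - 1).toNat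
      = g.length + (pvRow g 0).length - 1 := by omega
  have hN : ((g.length + (pvRow g 0).length - 1 : Nat) : Int)
      = ((g.length : Nat) : Int) + (((pvRow g 0).length : Nat) : Int) - 1 := by omega
  obtain ⟨hrevlen, hrevget⟩ := pv_rev_spec g g.length (pvRow g 0).length
  simp only [diag_str_lists, diag_str_lists_alt, hNc, Int.toNat_natCast]
  rw [hrevlen]
  rw [hrevget 0 (by omega) (by exact_mod_cast hR1)]
  rw [show ((pvDown (pvRow g 0).length).map (fun j => pvCh (pvRow g (0 : Int)) j)).length
      = (pvRow g 0).length by simp [pvDown]]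
  rw [pv_rtlA_eq g g.length (pvRow g 0).length, pv_B_eq g g.length (pvRow g 0).length]
  refine Prod.ext rfl ?_
  simp only
  rw [pv_ltrA_eq g _ g.length (pvRow g 0).length (g.length + (pvRow g 0).length - 1) _
    hrevget hN]
  rw [pv_ltr_core g g.length (pvRow g 0).length (g.length + (pvRow g 0).length - 1) hN]
  rw [pv_pyRange_up g.length, pv_pyRange_up (pvRow g 0).length]

-- ===== VERDICT (by name: the statement is the Claim_ definition above) =====
theorem diag_str_lists_spec : Claim_equal_diag_str_lists := by
  intro g _ hpre
  unfold Spec_diag_str_lists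
  exact pv_main g hpre.1
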